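-- pv_equiv track=rewrite | github.com/Yawn-Sean/Daily_CF_Problems | daily_problems/2025/09/0915/personal_submission/cf102861i_liryc.py | solve
-- ===== SOURCE A (Python) =====
-- def solve(n: int, a: list[int]) -> int:
--     MOD = 10 ** 9 + 7
--
--     pa = [-1] + [x - 1 for x in a]
--
--     g = [[] for _ in range(n)]
--     for i in range(1, n):
--         g[pa[i]].append(i)
--
--     stk = [0]
--     for i in stk:
--         for j in g[i]:
--             stk.append(j)
--
--     dp0 = [1] * n
--     dp1 = [1] * n
--
--     while stk:
--         i = stk.pop()
--         if len(g[i]) == 0: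
--             continue
--
--         c0, c1 = 0, 1
--
--         for j in g[i]:
--             c0 = (c1 * dp0[j] + c0 * dp1[j]) % MOD
--             c1 = c1 * dp1[j] % MOD
--
--         dp0[i] = c0
--         dp1[i] = (c0 + c1) % MOD
--
--     return dp1[0]
-- ===== SOURCE B (Python) =====
-- def solve(n: int, a: list[int]) -> int:
--     MOD = 10 ** 9 + 7
--
--     g = [[] for _ in range(n)]
--     for k, x in enumerate(a[:n - 1]):
--         g[x - 1].append(k + 1)
--
--     # one pass of simulated recursion: a frame is [node, next child index, c0, c1];
--     # each finished child's (dp0, dp1) pair in `ret` is folded into its parent frame,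
--     # so no dp arrays and no traversal-order list are ever built
--     stack = [[0, 0, 0, 1]]
--     ret = (1, 1)
--     while stack:
--         fr = stack[-1]
--         i, k, c0, c1 = fr
--         if k > 0:
--             d0, d1 = ret
--             c0 = (c1 * d0 + c0 * d1) % MOD
--             c1 = c1 * d1 % MOD
--         if k < len(g[i]):
--             fr[1] = k + 1
--             fr[2] = c0
--             fr[3] = c1
--             stack.append([g[i][k], 0, 0, 1])
--         else:
--             stack.pop()
--             ret = (1, 1) if not g[i] else (c0, (c0 + c1) % MOD)
--     return ret[1]
-- ===== Notes on version B (the rewrite author's own statement) =====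
-- stated objective: alternative
-- what changed: Replaces A's three staged passes (building a BFS order list by index-scanning a growing list, dp0/dp1 arrays of size n, and a popping sweep over that list) by a single simulated-recursion pass: an explicit stack of frames (node, next-child index, partial c0, c1) where each finished child's (dp0,dp1) pair is folded into its parent's frame on the fly, so no dp arrays and no traversal-order list are ever built.
import Mathlib
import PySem

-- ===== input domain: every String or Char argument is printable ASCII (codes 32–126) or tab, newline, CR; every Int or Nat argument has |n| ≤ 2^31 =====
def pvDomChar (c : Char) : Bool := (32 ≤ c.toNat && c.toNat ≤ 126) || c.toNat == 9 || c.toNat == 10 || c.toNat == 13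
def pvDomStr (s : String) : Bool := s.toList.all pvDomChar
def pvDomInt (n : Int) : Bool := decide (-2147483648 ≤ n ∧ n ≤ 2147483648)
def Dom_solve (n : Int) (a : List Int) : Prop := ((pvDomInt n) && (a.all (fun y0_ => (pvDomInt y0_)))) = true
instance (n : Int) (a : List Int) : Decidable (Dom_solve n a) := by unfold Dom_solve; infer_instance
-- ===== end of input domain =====

-- B replaces A's three staged passes (explicit BFS order list, dp arrays, popping sweep) by a
-- single simulated-recursion pass over a stack of frames carrying partial accumulators
-- (objective: alternative; same asymptotic cost).

-- ===== PORT A =====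
-- MOD = 10 ** 9 + 7
def pvModA : Int := 1000000007

-- a Python list index p with -len ≤ p < 0 wraps to p + len (exact on Pre_, where -n ≤ p < n)
def pvWrapA (n : Int) (p : Int) : Nat := (if p < 0 then p + n else p).toNat

-- `g = [[] for _ in range(n)]; for i in range(1, n): g[pa[i]].append(i)` with pa[i] = a[i-1] - 1
-- (a[i-1] is read with getD: in bounds under Pre_)
def pvBuildA (n : Int) (a : List Int) : List (List Nat) :=
  (List.range' 1 (n.toNat - 1)).foldl
    (fun g i =>
      let k := pvWrapA n (a.getD (i - 1) 0 - 1)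
      g.set k (g.getD k [] ++ [i]))
    (List.replicate n.toNat [])

-- `stk = [0]; for i in stk: for j in g[i]: stk.append(j)` — an index scan over a growing list;
-- the fuel only bounds the number of scanned positions (≤ n under Pre_)
def pvScanA (g : List (List Nat)) : Nat → Nat → List Nat → List Nat
  | 0, _, stk => stk
  | fuel+1, idx, stk =>
    if idx < stk.length then pvScanA g fuel (idx + 1) (stk ++ g.getD (stk.getD idx 0) [])
    else stk

-- `c0, c1 = 0, 1; for j in g[i]: c0, c1 = ...`; dp k stands for the pair (dp0[k], dp1[k])
def pvCombineA (g : List (List Nat)) (dp : Nat → Int × Int) (i : Nat) : Int × Int :=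
  (g.getD i []).foldl
    (fun c j => ((c.2 * (dp j).1 + c.1 * (dp j).2) % pvModA, c.2 * (dp j).2 % pvModA))
    (0, 1)

-- `while stk: i = stk.pop(); ...` pops from the end and never pushes: we recurse over
-- stk.reverse, whose head is exactly the next popped element
def pvPopA (g : List (List Nat)) : List Nat → (Nat → Int × Int) → (Nat → Int × Int)
  | [], dp => dp
  | i :: rest, dp =>
    pvPopA g rest
      (if (g.getD i []).length = 0 then dp
       else
         let c := pvCombineA g dp i
         fun k => if k = i then (c.1, (c.1 + c.2) % pvModA) else dp k)

def solve (n : Int) (a : List Int) : Int :=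
  let g := pvBuildA n a
  let stk := pvScanA g n.toNat 0 [0]
  (pvPopA g stk.reverse (fun _ => (1, 1)) 0).2

-- ===== PORT B =====
def pvModB : Int := 1000000007

def pvWrapB (n : Int) (p : Int) : Nat := (if p < 0 then p + n else p).toNat

-- `for k, x in enumerate(a[:n-1]): g[x-1].append(k+1)`; zipIdx pairs are (element, index)
def pvBuildB (n : Int) (a : List Int) : List (List Nat) :=
  ((a.take (n.toNat - 1)).zipIdx).foldl
    (fun g xk =>
      let t := pvWrapB n (xk.1 - 1)
      g.set t (g.getD t [] ++ [xk.2 + 1]))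
    (List.replicate n.toNat [])

-- `while stack: fr = stack[-1]; i, k, c0, c1 = fr; ...` — the simulated-recursion loop of Source B;
-- a frame is (node, next child index, c0, c1), `ret` is the last finished child's (dp0, dp1);
-- the fuel argument only makes the loop total (it is ample under Pre_, where the DFS
-- touches each frame |children| + 1 times)
def pvMach (g : List (List Nat)) : Nat → List (Nat × Nat × Int × Int) → Int × Int → Int × Int
  | 0, _, ret => ret
  | _+1, [], ret => ret
  | fuel+1, (i, k, c0, c1) :: rest, ret =>
    let c0' := if 0 < k then (c1 * ret.1 + c0 * ret.2) % pvModB else c0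
    let c1' := if 0 < k then c1 * ret.2 % pvModB else c1
    if k < (g.getD i []).length then
      pvMach g fuel (((g.getD i []).getD k 0, 0, 0, 1) :: (i, k + 1, c0', c1') :: rest) ret
    else
      pvMach g fuel rest (if (g.getD i []).length = 0 then (1, 1) else (c0', (c0' + c1') % pvModB))

def solve_alt (n : Int) (a : List Int) : Int :=
  let g := pvBuildB n a
  (pvMach g ((n.toNat + 2) ^ (n.toNat + 2)) [(0, 0, 0, 1)] (1, 1)).2

-- ===== PRECONDITION & SPEC =====
-- Exactly the inputs where the Python A returns: n ≥ 1, a long enough (extra entries are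
-- ignored), and every used parent label a[k] within Python's (possibly negative, wrapping)
-- list-index range 1-n ≤ a[k] ≤ n; outside this A raises IndexError.
def Pre_solve (n : Int) (a : List Int) : Prop :=
  1 ≤ n ∧ n - 1 ≤ (a.length : Int) ∧
  ∀ k : Nat, k < n.toNat - 1 → 1 - n ≤ a.getD k 0 ∧ a.getD k 0 ≤ n
instance (n : Int) (a : List Int) : Decidable (Pre_solve n a) := by unfold Pre_solve; infer_instance

def pvWitness_solve : Int × List Int := (3, [1, 1])

def Spec_solve (n : Int) (a : List Int) (out : Int) : Prop := out = solve_alt n a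
instance (n : Int) (a : List Int) (out : Int) : Decidable (Spec_solve n a out) := by unfold Spec_solve; infer_instance

-- ===== CLAIM (what is proved, stated in full; the proofs are below) =====
def Claim_equal_solve : Prop := ∀ (n : Int) (a : List Int), Dom_solve n a → Pre_solve n a → Spec_solve n a (solve n a)

-- ===== LEMMAS AND PROOFS =====

-- children list of node i
def pvG (g : List (List Nat)) (i : Nat) : List Nat := g.getD i []

-- the well-formedness facts the builds guarantee on Pre_
def pvGF (n' : Nat) (g : List (List Nat)) : Prop :=
  g.length = n' ∧
  (∀ i j, j ∈ pvG g i → 1 ≤ j ∧ j < n') ∧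
  (∀ j i₁ i₂, j ∈ pvG g i₁ → j ∈ pvG g i₂ → i₁ = i₂) ∧
  (∀ i, (pvG g i).Nodup)

-- the common one-child accumulator update both ports use
def pvUpd (c r : Int × Int) : Int × Int :=
  ((c.2 * r.1 + c.1 * r.2) % pvModA, c.2 * r.2 % pvModA)

-- the one-node DP step A's popping sweep performs
def pvStep (g : List (List Nat)) (i : Nat) (dp : Nat → Int × Int) : Nat → Int × Int :=
  if pvG g i = [] then dp
  else
    let c := pvCombineA g dp i
    fun k => if k = i then (c.1, (c.1 + c.2) % pvModA) else dp k

-- the recursive tree DP both sides are shown to compute; the list L of still-usable nodes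
-- makes the recursion well-founded
def pvDp (g : List (List Nat)) : List Nat → Nat → Int × Int
  | L, i =>
    if h : i ∈ L then
      if pvG g i = [] then (1, 1)
      else
        let c := ((pvG g i).map (fun j => pvDp g (L.erase i) j)).foldl pvUpd (0, 1)
        (c.1, (c.1 + c.2) % pvModA)
    else (1, 1)
termination_by L _ => L.length
decreasing_by
  have := List.length_pos_of_mem h
  rw [List.length_erase_of_mem h]; omega

-- "the whole subtree of i lies inside L, with no reuse of nodes"
def pvBelow (g : List (List Nat)) : List Nat → Nat → Prop
  | L, i =>
    if h : i ∈ L then ∀ j ∈ pvG g i, pvBelow g (L.erase i) j else False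
termination_by L _ => L.length
decreasing_by
  have := List.length_pos_of_mem h
  rw [List.length_erase_of_mem h]; omega

-- number of machine iterations spent on the subtree of i
def pvCost (g : List (List Nat)) : List Nat → Nat → Nat
  | L, i =>
    if h : i ∈ L then
      ((pvG g i).map (fun j => pvCost g (L.erase i) j)).sum + (pvG g i).length + 1
    else 0
termination_by L _ => L.length
decreasing_by
  have := List.length_pos_of_mem h
  rw [List.length_erase_of_mem h]; omega

theorem pvBelow_iff (g : List (List Nat)) (L : List Nat) (i : Nat) :
    pvBelow g L i ↔ (i ∈ L ∧ ∀ j ∈ pvG g i, pvBelow g (L.erase i) j) := by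
  rw [pvBelow]
  by_cases h : i ∈ L <;> simp [h]

theorem pvDp_mem (g : List (List Nat)) (L : List Nat) (i : Nat) (h : i ∈ L) :
    pvDp g L i =
      if pvG g i = [] then (1, 1)
      else
        let c := ((pvG g i).map (fun j => pvDp g (L.erase i) j)).foldl pvUpd (0, 1)
        (c.1, (c.1 + c.2) % pvModA) := by
  rw [pvDp]; simp [h]

theorem pvCost_mem (g : List (List Nat)) (L : List Nat) (i : Nat) (h : i ∈ L) :
    pvCost g L i =
      ((pvG g i).map (fun j => pvCost g (L.erase i) j)).sum + (pvG g i).length + 1 := by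
  rw [pvCost]; simp [h]

theorem pvG_set (g : List (List Nat)) (k : Nat) (v : List Nat) (i : Nat) (hk : k < g.length) :
    pvG (g.set k v) i = if i = k then v else pvG g i := by
  unfold pvG
  simp only [List.getD, List.getElem?_set]
  by_cases h : i = k
  · subst h; simp [hk]
  · simp [h, Ne.symm h]

theorem pvG_replicate (n' : Nat) (t : Nat) : pvG (List.replicate n' ([] : List Nat)) t = [] := by
  unfold pvG
  simp [List.getD, List.getElem?_replicate]
  split <;> rfl

theorem pvBuild_inv (n' : Nat) (f : Nat → Nat) :
    ∀ (l : List Nat) (g : List (List Nat)),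
    g.length = n' →
    (∀ i ∈ l, f i < n') →
    l.Nodup →
    (∀ i ∈ l, 1 ≤ i ∧ i < n') →
    (∀ i ∈ l, ∀ t, i ∉ pvG g t) →
    (∀ t j, j ∈ pvG g t → 1 ≤ j ∧ j < n') →
    (∀ j t₁ t₂, j ∈ pvG g t₁ → j ∈ pvG g t₂ → t₁ = t₂) →
    (∀ t, (pvG g t).Nodup) →
    pvGF n' (l.foldl (fun g i => g.set (f i) (g.getD (f i) [] ++ [i])) g) := by
  intro l
  induction l with
  | nil =>
    intro g hlen _ _ _ _ hb hu hn
    exact ⟨hlen, hb, hu, hn⟩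
  | cons i l ih =>
    intro g hlen hf hnd hr hfresh hb hu hn
    simp only [List.foldl_cons]
    have hfi : f i < g.length := hlen ▸ hf i List.mem_cons_self
    have hG : ∀ t, pvG (g.set (f i) (g.getD (f i) [] ++ [i])) t
        = if t = f i then pvG g (f i) ++ [i] else pvG g t := by
      intro t
      have := pvG_set g (f i) (pvG g (f i) ++ [i]) t hfi
      simpa [pvG] using this
    have hifresh : ∀ t, i ∉ pvG g t := hfresh i List.mem_cons_self
    refine ih _ ?_ ?_ (List.nodup_cons.1 hnd).2 ?_ ?_ ?_ ?_ ?_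
    · simpa using hlen
    · exact fun x hx => hf x (List.mem_cons_of_mem _ hx)
    · exact fun x hx => hr x (List.mem_cons_of_mem _ hx)
    · intro x hx t
      rw [hG t]
      have hxi : x ≠ i := fun e => (List.nodup_cons.1 hnd).1 (e ▸ hx)
      split
      · simp only [List.mem_append, List.mem_singleton]
        rintro (hc | hc)
        · exact hfresh x (List.mem_cons_of_mem _ hx) _ hc
        · exact hxi hc
      · exact hfresh x (List.mem_cons_of_mem _ hx) t
    · intro t j hj
      rw [hG t] at hj
      split at hj
      · rcases List.mem_append.1 hj with hc | hc
        · exact hb _ j hc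
        · have : j = i := List.mem_singleton.1 hc
          exact this ▸ hr i List.mem_cons_self
      · exact hb t j hj
    · intro j t₁ t₂ h₁ h₂
      rw [hG t₁] at h₁
      rw [hG t₂] at h₂
      by_cases hji : j = i
      · subst hji
        split at h₁
        · rename_i e₁
          split at h₂
          · rename_i e₂; rw [e₁, e₂]
          · exact absurd h₂ (hifresh t₂)
        · exact absurd h₁ (hifresh t₁)
      · have h₁' : j ∈ pvG g t₁ := by
          split at h₁
          · rcases List.mem_append.1 h₁ with hc | hc
            · rename_i ht; exact ht ▸ hc
            · exact absurd (List.mem_singleton.1 hc) hji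
          · exact h₁
        have h₂' : j ∈ pvG g t₂ := by
          split at h₂
          · rcases List.mem_append.1 h₂ with hc | hc
            · rename_i ht; exact ht ▸ hc
            · exact absurd (List.mem_singleton.1 hc) hji
          · exact h₂
        exact hu j t₁ t₂ h₁' h₂'
    · intro t
      rw [hG t]
      split
      · exact List.Nodup.append (hn (f i)) (by simp) (by
          intro x hx hx'
          exact hifresh (f i) ((List.mem_singleton.1 (by simpa using hx')) ▸ hx))
      · exact hn t

theorem pvGF_buildA (n : Int) (a : List Int) (h : Pre_solve n a) :
    pvGF n.toNat (pvBuildA n a) := by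
  obtain ⟨hn, hlen, hrange⟩ := h
  unfold pvBuildA
  refine pvBuild_inv n.toNat (fun i => pvWrapA n (a.getD (i - 1) 0 - 1))
    (List.range' 1 (n.toNat - 1)) (List.replicate n.toNat []) (by simp) ?_
    (List.nodup_range') ?_ ?_ ?_ ?_ ?_
  · intro i hi
    rw [List.mem_range'_1] at hi
    have hb := hrange (i - 1) (by omega)
    simp only [pvWrapA]
    split <;> omega
  · intro i hi
    rw [List.mem_range'_1] at hi
    omega
  · intro i _ t
    rw [pvG_replicate]
    exact List.not_mem_nil
  · intro t j hj
    rw [pvG_replicate] at hj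
    exact absurd hj List.not_mem_nil
  · intro j t₁ t₂ h₁
    rw [pvG_replicate] at h₁
    exact absurd h₁ List.not_mem_nil
  · intro t
    rw [pvG_replicate]
    exact List.nodup_nil

theorem pvWrapB_eq : pvWrapB = pvWrapA := rfl

theorem pvZip_fold (n : Int) (a : List Int) :
    ∀ (l : List Int) (s : Nat) (g : List (List Nat)),
    (∀ k, (hk : k < l.length) → l[k] = a.getD (s + k) 0) →
    (l.zipIdx s).foldl
      (fun g xk =>
        let t := pvWrapB n (xk.1 - 1)
        g.set t (g.getD t [] ++ [xk.2 + 1])) g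
      = (List.range' (s + 1) l.length).foldl
      (fun g i =>
        let k := pvWrapA n (a.getD (i - 1) 0 - 1)
        g.set k (g.getD k [] ++ [i])) g := by
  intro l
  induction l with
  | nil => intro s g _; rfl
  | cons x l ih =>
    intro s g hk
    rw [List.zipIdx_cons, List.length_cons, List.range'_succ]
    simp only [List.foldl_cons]
    have hx : x = a.getD (s + 0) 0 := by
      have := hk 0 (by simp)
      simpa using this
    have hx' : a.getD (s + 1 - 1) 0 = x := by simpa using hx.symm
    rw [pvWrapB_eq, hx']
    refine ih (s + 1) _ ?_
    intro k hkl
    have := hk (k + 1) (by simpa using Nat.succ_lt_succ hkl)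
    simpa [Nat.add_comm, Nat.add_assoc, Nat.add_left_comm] using this

theorem pvBuildB_eq (n : Int) (a : List Int) (h : Pre_solve n a) :
    pvBuildB n a = pvBuildA n a := by
  obtain ⟨hn, hlen, _⟩ := h
  have hm : n.toNat - 1 ≤ a.length := by omega
  unfold pvBuildB pvBuildA
  have hlt : (a.take (n.toNat - 1)).length = n.toNat - 1 := by
    simp [List.length_take]; omega
  have := pvZip_fold n a (a.take (n.toNat - 1)) 0 (List.replicate n.toNat [])
    (by
      intro k hk
      rw [hlt] at hk
      rw [List.getElem_take]
      rw [List.getD_eq_getElem a 0 (by omega)]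
      simp)
  simpa [hlt] using this

theorem pvPopA_foldl (g : List (List Nat)) (l : List Nat) (dp : Nat → Int × Int) :
    pvPopA g l dp = l.foldl (fun dp i => pvStep g i dp) dp := by
  induction l generalizing dp with
  | nil => rfl
  | cons i rest ih =>
    simp only [pvPopA, List.foldl_cons, ih]
    congr 1
    by_cases h : g.getD i [] = []
    · simp [pvStep, pvG, pvCombineA]
    · simp only [pvStep, pvG, List.length_eq_zero_iff, if_neg h]

theorem pvStep_ne (g : List (List Nat)) (i k : Nat) (dp : Nat → Int × Int) (h : k ≠ i) :
    pvStep g i dp k = dp k := by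
  unfold pvStep
  split
  · rfl
  · simp [h]

theorem pvCombineA_congr (g : List (List Nat)) (dp dp' : Nat → Int × Int) (i : Nat)
    (h : ∀ j ∈ pvG g i, dp j = dp' j) : pvCombineA g dp i = pvCombineA g dp' i := by
  unfold pvCombineA
  have : ∀ (l : List Nat) (c : Int × Int), (∀ j ∈ l, dp j = dp' j) →
      l.foldl (fun c j => ((c.2 * (dp j).1 + c.1 * (dp j).2) % pvModA, c.2 * (dp j).2 % pvModA)) c
        = l.foldl (fun c j => ((c.2 * (dp' j).1 + c.1 * (dp' j).2) % pvModA, c.2 * (dp' j).2 % pvModA)) c := by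
    intro l
    induction l with
    | nil => intro c _; rfl
    | cons j l ih =>
      intro c hl
      simp only [List.foldl_cons, hl j List.mem_cons_self]
      exact ih _ (fun j' hj' => hl j' (List.mem_cons_of_mem _ hj'))
  exact this _ _ (by simpa [pvG] using h)

theorem pvCombineA_map (g : List (List Nat)) (dp : Nat → Int × Int) (i : Nat) :
    pvCombineA g dp i = ((pvG g i).map dp).foldl pvUpd (0, 1) := by
  rw [List.foldl_map]
  rfl

theorem pvLen_le (l : List Nat) (n' : Nat) (h1 : l.Nodup) (h2 : ∀ x ∈ l, x < n') :
    l.length ≤ n' := by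
  have hsub : l ⊆ List.range n' := fun x hx => List.mem_range.2 (h2 x hx)
  calc l.length ≤ (List.range n').length := List.Subperm.length_le (List.subperm_of_subset h1 hsub)
    _ = n' := List.length_range

theorem pvScanA_inv (g : List (List Nat)) (n' : Nat) (hg : pvGF n' g) :
    ∀ (fuel idx : Nat) (stk : List Nat),
    stk.Nodup → (∀ x ∈ stk, x < n') →
    stk = 0 :: (stk.take idx).flatMap (pvG g) →
    idx ≤ stk.length →
    stk.Pairwise (fun p q => p ∉ pvG g q) →
    (∀ x ∈ stk, x ∉ pvG g x) →
    n' ≤ fuel + idx →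
    (pvScanA g fuel idx stk).Nodup ∧ (∀ x ∈ pvScanA g fuel idx stk, x < n') ∧
    pvScanA g fuel idx stk = 0 :: (pvScanA g fuel idx stk).flatMap (pvG g) ∧
    (pvScanA g fuel idx stk).Pairwise (fun p q => p ∉ pvG g q) ∧
    (∀ x ∈ pvScanA g fuel idx stk, x ∉ pvG g x) := by
  obtain ⟨hglen, hgb, hgu, hgn⟩ := hg
  intro fuel
  induction fuel with
  | zero =>
    intro idx stk hnd hb heq hle hpw hns hfuel
    have hlen : stk.length ≤ n' := pvLen_le stk n' hnd hb
    have hidx : idx = stk.length := by omega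
    rw [pvScanA]
    rw [hidx, List.take_length] at heq
    exact ⟨hnd, hb, heq, hpw, hns⟩
  | succ f ih =>
    intro idx stk hnd hb heq hle hpw hns hfuel
    rw [pvScanA]
    split
    · rename_i hidx
      set i := stk.getD idx 0 with hi
      have hival : i = stk[idx] := List.getD_eq_getElem stk 0 hidx
      have himem : i ∈ stk := hival ▸ List.getElem_mem hidx
      have hitake : i ∉ stk.take idx := by
        have hdisj := List.disjoint_of_nodup_append ((List.take_append_drop idx stk).symm ▸ hnd)
        intro hc
        refine hdisj hc ?_
        rw [List.drop_eq_getElem_cons hidx, ← hival]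
        exact List.mem_cons_self
      have hfresh : ∀ j ∈ pvG g i, j ∉ stk := by
        intro j hj hjs
        have hj0 : 1 ≤ j := (hgb i j hj).1
        rw [heq] at hjs
        rcases List.mem_cons.1 hjs with h0 | hfm
        · omega
        · obtain ⟨p, hp, hjp⟩ := List.mem_flatMap.1 hfm
          have : p = i := hgu j p i hjp hj
          exact hitake (this ▸ hp)
      have hndC : (pvG g i).Nodup := hgn i
      refine ih (idx + 1) (stk ++ pvG g i) ?_ ?_ ?_ ?_ ?_ ?_ (by omega)
      · rw [List.nodup_append]
        exact ⟨hnd, hndC, by intro x hx y hy e; exact hfresh x (e ▸ hy) hx⟩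
      · intro x hx
        rcases List.mem_append.1 hx with hx | hx
        · exact hb x hx
        · exact (hgb i x hx).2
      · have htake : (stk ++ pvG g i).take (idx + 1) = stk.take idx ++ [i] := by
          rw [List.take_append_of_le_length (by omega), List.take_add_one,
            List.getElem?_eq_getElem hidx, ← hival]
          rfl
        rw [htake, List.flatMap_append]
        conv_lhs => rw [heq]
        simp [List.cons_append]
      · rw [List.length_append]; omega
      · rw [List.pairwise_append]
        refine ⟨hpw, ?_, ?_⟩
        · refine List.pairwise_of_forall_mem_list ?_
          intro p hp q hq hpq
          have : q = i := hgu p q i hpq hp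
          exact hfresh q (this ▸ hq) (this ▸ himem)
        · intro p hp q hq hpq
          have hp0 : 1 ≤ p := (hgb q p hpq).1
          rw [heq] at hp
          rcases List.mem_cons.1 hp with h0 | hfm
          · omega
          · obtain ⟨p', hp', hpp'⟩ := List.mem_flatMap.1 hfm
            have he : p' = q := hgu p p' q hpp' hpq
            exact hfresh q hq (List.mem_of_mem_take (he ▸ hp'))
      · intro x hx
        rcases List.mem_append.1 hx with hx | hx
        · exact hns x hx
        · intro hc
          have : x = i := hgu x x i hc hx
          exact hns i himem (this ▸ hx)
    · have hidx : idx = stk.length := by omega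
      rw [hidx, List.take_length] at heq
      exact ⟨hnd, hb, heq, hpw, hns⟩

theorem pvScanA_trav (n : Int) (g : List (List Nat)) (hg : pvGF n.toNat g) (hn : 1 ≤ n) :
    (pvScanA g n.toNat 0 [0]).Nodup ∧
    (∀ x ∈ pvScanA g n.toNat 0 [0], x < n.toNat) ∧
    pvScanA g n.toNat 0 [0] = 0 :: (pvScanA g n.toNat 0 [0]).flatMap (pvG g) ∧
    (pvScanA g n.toNat 0 [0]).Pairwise (fun p q => p ∉ pvG g q) ∧
    (∀ x ∈ pvScanA g n.toNat 0 [0], x ∉ pvG g x) := by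
  refine pvScanA_inv g n.toNat hg n.toNat 0 [0]
    (List.nodup_singleton 0) (by intro x hx; simp at hx; omega) (by simp) (by simp)
    (List.pairwise_singleton _ 0) ?_ (by omega)
  intro x hx
  have hx0 : x = 0 := List.mem_singleton.1 hx
  subst hx0
  intro hc
  exact absurd (hg.2.1 0 0 hc).1 (by omega)

-- a child of a node of S lies strictly after it in S
theorem pvChildMem (g : List (List Nat)) (S pre rest : List Nat) (i j : Nat)
    (_hnd : S.Nodup) (hpw : S.Pairwise (fun p q => p ∉ pvG g q))
    (hns : ∀ x ∈ S, x ∉ pvG g x) (hcl : ∀ x ∈ S, ∀ y ∈ pvG g x, y ∈ S)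
    (hsplit : S = pre ++ i :: rest) (hj : j ∈ pvG g i) : j ∈ rest := by
  have hiS : i ∈ S := by rw [hsplit]; simp
  have hjS : j ∈ S := hcl i hiS j hj
  have hji : j ≠ i := by
    intro e; exact hns i hiS (e ▸ hj)
  have hjpre : j ∉ pre := by
    intro hc
    rw [hsplit] at hpw
    have := (List.pairwise_append.1 hpw).2.2 j hc i List.mem_cons_self
    exact this hj
  rw [hsplit] at hjS
  rcases List.mem_append.1 hjS with h | h
  · exact absurd h hjpre
  · rcases List.mem_cons.1 h with h | h
    · exact absurd h hji
    · exact h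

-- every suffix head of S has its whole subtree inside any L containing that suffix
theorem pvBelow_suffix (g : List (List Nat)) (S : List Nat)
    (hnd : S.Nodup) (hpw : S.Pairwise (fun p q => p ∉ pvG g q))
    (hns : ∀ x ∈ S, x ∉ pvG g x) (hcl : ∀ x ∈ S, ∀ y ∈ pvG g x, y ∈ S) :
    ∀ (N : Nat) (pre : List Nat) (i : Nat) (r : List Nat), (i :: r).length ≤ N →
    S = pre ++ i :: r → ∀ L, (∀ x ∈ i :: r, x ∈ L) → pvBelow g L i := by
  intro N
  induction N with
  | zero => intro pre i r h; simp at h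
  | succ N ih =>
    intro pre i r hlen hsplit L hL
    rw [pvBelow_iff]
    refine ⟨hL i List.mem_cons_self, ?_⟩
    intro j hj
    have hjr : j ∈ r := pvChildMem g S pre r i j hnd hpw hns hcl hsplit hj
    obtain ⟨r1, r2, hr⟩ := List.append_of_mem hjr
    have hir : i ∉ r := by
      rw [hsplit] at hnd
      have := (List.nodup_append.1 hnd).2.1
      exact (List.nodup_cons.1 this).1
    refine ih (pre ++ i :: r1) j r2 ?_ ?_ (L.erase i) ?_
    · have : r.length = r1.length + r2.length + 1 := by rw [hr]; simp; omega
      simp at hlen ⊢; omega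
    · rw [hsplit, hr]; simp
    · intro x hx
      have hxr : x ∈ r := by rw [hr]; simp at hx ⊢; tauto
      have hxi : x ≠ i := fun e => hir (e ▸ hxr)
      exact (List.mem_erase_of_ne hxi).2 (hL x (List.mem_cons_of_mem _ hxr))

-- pvDp does not depend on the usable-node list, as long as the subtree fits in it
theorem pvDp_congr (g : List (List Nat)) :
    ∀ (N : Nat) (L L' : List Nat) (i : Nat), L.length ≤ N →
    pvBelow g L i → pvBelow g L' i → pvDp g L i = pvDp g L' i := by
  intro N
  induction N with
  | zero =>
    intro L L' i hlen hB
    rw [pvBelow_iff] at hB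
    have := List.length_pos_of_mem hB.1
    omega
  | succ N ih =>
    intro L L' i hlen hB hB'
    rw [pvBelow_iff] at hB hB'
    rw [pvDp_mem g L i hB.1, pvDp_mem g L' i hB'.1]
    by_cases hg : pvG g i = []
    · simp [hg]
    · simp only [if_neg hg]
      have hmap : (pvG g i).map (fun j => pvDp g (L.erase i) j)
          = (pvG g i).map (fun j => pvDp g (L'.erase i) j) := by
        refine List.map_congr_left ?_
        intro j hj
        refine ih (L.erase i) (L'.erase i) j ?_ (hB.2 j hj) (hB'.2 j hj)
        have := List.length_pos_of_mem hB.1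
        rw [List.length_erase_of_mem hB.1]; omega
      rw [hmap]

-- A's popping sweep over the reversed scan list computes pvDp at every scanned node
theorem pvAfold (g : List (List Nat)) (S : List Nat)
    (hnd : S.Nodup) (hpw : S.Pairwise (fun p q => p ∉ pvG g q))
    (hns : ∀ x ∈ S, x ∉ pvG g x) (hcl : ∀ x ∈ S, ∀ y ∈ pvG g x, y ∈ S) :
    ∀ (suf pre : List Nat), S = pre ++ suf → ∀ x,
    (suf.reverse.foldl (fun dp i => pvStep g i dp) (fun _ => ((1 : Int), (1 : Int)))) x
      = if x ∈ suf then pvDp g S x else (1, 1) := by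
  intro suf
  induction suf with
  | nil => intro pre _ x; simp
  | cons i rest ih =>
    intro pre hsplit x
    have hpre' : S = (pre ++ [i]) ++ rest := by rw [hsplit]; simp
    have hF : ∀ y, (rest.reverse.foldl (fun dp i => pvStep g i dp) (fun _ => ((1:Int),(1:Int)))) y
        = if y ∈ rest then pvDp g S y else (1, 1) := ih (pre ++ [i]) hpre'
    have hfold : ((i :: rest).reverse.foldl (fun dp i => pvStep g i dp)
        (fun _ => ((1:Int),(1:Int))))
        = pvStep g i (rest.reverse.foldl (fun dp i => pvStep g i dp)
          (fun _ => ((1:Int),(1:Int)))) := by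
      rw [List.reverse_cons, List.foldl_append]
      rfl
    rw [hfold]
    have hir : i ∉ rest := by
      rw [hsplit] at hnd
      have := (List.nodup_append.1 hnd).2.1
      exact (List.nodup_cons.1 this).1
    by_cases hxi : x = i
    · subst hxi
      simp only [List.mem_cons, true_or, if_pos]
      have hxS : x ∈ S := by rw [hsplit]; simp
      by_cases hg : pvG g x = []
      · rw [pvStep, if_pos hg, hF x, if_neg hir, pvDp_mem g S x hxS, if_pos hg]
      · rw [pvStep, if_neg hg]
        have hchild : ∀ j ∈ pvG g x,
            (rest.reverse.foldl (fun dp i => pvStep g i dp) (fun _ => ((1:Int),(1:Int)))) j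
              = pvDp g (S.erase x) j := by
          intro j hj
          have hjr : j ∈ rest := pvChildMem g S pre rest x j hnd hpw hns hcl hsplit hj
          rw [hF j, if_pos hjr]
          obtain ⟨r1, r2, hr⟩ := List.append_of_mem hjr
          have hs2 : S = (pre ++ x :: r1) ++ j :: r2 := by rw [hsplit, hr]; simp
          have hBS : pvBelow g S j :=
            pvBelow_suffix g S hnd hpw hns hcl S.length (pre ++ x :: r1) j r2
              (by rw [hs2]; simp; omega) hs2 S (fun y hy => by rw [hs2]; simp at hy ⊢; tauto)
          have hBE : pvBelow g (S.erase x) j := by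
            refine pvBelow_suffix g S hnd hpw hns hcl S.length (pre ++ x :: r1) j r2
              (by rw [hs2]; simp; omega) hs2 (S.erase x) ?_
            intro y hy
            have hyr : y ∈ rest := by rw [hr]; simp at hy ⊢; tauto
            have hyx : y ≠ x := fun e => hir (e ▸ hyr)
            exact (List.mem_erase_of_ne hyx).2 (by rw [hsplit]; simp [hyr])
          exact pvDp_congr g S.length S (S.erase x) j (le_refl _) hBS hBE
        rw [pvCombineA_congr g _ (fun j => pvDp g (S.erase x) j) x hchild]
        rw [pvDp_mem g S x hxS, if_neg hg]
        rw [pvCombineA_map]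
        simp
    · rw [pvStep_ne g i x _ hxi, hF x]
      simp only [List.mem_cons]
      by_cases hxr : x ∈ rest
      · simp [hxr]
      · simp [hxr, hxi]

theorem pvMach_nil (g : List (List Nat)) (f : Nat) (ret : Int × Int) :
    pvMach g f [] ret = ret := by
  cases f <;> rfl

-- the machine's per-frame processing of the remaining children csR
theorem pvFrames (g : List (List Nat)) (L : List Nat) (i : Nat)
    (HR : ∀ j, pvBelow g (L.erase i) j → ∀ f rest ret,
      pvMach g (pvCost g (L.erase i) j + f) ((j, 0, 0, 1) :: rest) ret
        = pvMach g f rest (pvDp g (L.erase i) j)) :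
    ∀ (csR : List Nat) (k : Nat) (c r : Int × Int) (f : Nat)
      (rest : List (Nat × Nat × Int × Int)),
    k + csR.length = (pvG g i).length → (pvG g i).drop k = csR → 0 < k →
    (∀ j ∈ csR, pvBelow g (L.erase i) j) →
    pvMach g ((csR.map (fun j => pvCost g (L.erase i) j)).sum + csR.length + 1 + f)
      ((i, k, c.1, c.2) :: rest) r
      = pvMach g f rest
        (let c' := csR.foldl (fun c j => pvUpd c (pvDp g (L.erase i) j)) (pvUpd c r)
         (c'.1, (c'.1 + c'.2) % pvModA)) := by
  intro csR
  induction csR with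
  | nil =>
    intro k c r f rest hk hdrop hkpos _
    simp only [List.map_nil, List.sum_nil, List.length_nil, Nat.zero_add, List.foldl_nil]
    have hfuel : 0 + 0 + 1 + f = f + 1 := by omega
    rw [hfuel, pvMach]
    have hGg : g.getD i [] = pvG g i := rfl
    have hk' : k = (pvG g i).length := by simpa using hk
    rw [hGg]
    have hklen : ¬ k < (pvG g i).length := by omega
    have hlen0 : ¬ (pvG g i).length = 0 := by omega
    rw [if_neg hklen, if_neg hlen0]
    simp only [if_pos hkpos]
    rfl
  | cons j csR' ih =>
    intro k c r f rest hk hdrop hkpos hbel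
    have hklt : k < (pvG g i).length := by simp at hk; omega
    have hgetj : (pvG g i).getD k 0 = j := by
      have h1 : (pvG g i)[k]? = some j := by
        rw [← List.head?_drop, hdrop]; rfl
      simp [List.getD, h1]
    have hfuel : ((j :: csR').map (fun j => pvCost g (L.erase i) j)).sum + (j :: csR').length + 1 + f
        = (pvCost g (L.erase i) j
            + ((csR'.map (fun j => pvCost g (L.erase i) j)).sum + csR'.length + 1 + f)) + 1 := by
      simp [List.sum_cons]; omega
    rw [hfuel, pvMach]
    have hGg : g.getD i [] = pvG g i := rfl
    rw [hGg]
    rw [if_pos hklt]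
    simp only [if_pos hkpos]
    rw [hgetj]
    rw [HR j (hbel j List.mem_cons_self) _ _ _]
    have hdrop' : (pvG g i).drop (k + 1) = csR' := by
      rw [← List.tail_drop, hdrop]; rfl
    have := ih (k + 1) (pvUpd c r) (pvDp g (L.erase i) j) f rest
      (by simp at hk ⊢; omega) hdrop' (by omega)
      (fun x hx => hbel x (List.mem_cons_of_mem _ hx))
    simp only [List.foldl_cons]
    exact this

-- the machine runs the subtree of i and returns exactly pvDp of i
theorem pvRun (g : List (List Nat)) :
    ∀ (N : Nat) (L : List Nat), L.length ≤ N → ∀ i, pvBelow g L i →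
    ∀ f rest ret, pvMach g (pvCost g L i + f) ((i, 0, 0, 1) :: rest) ret
      = pvMach g f rest (pvDp g L i) := by
  intro N
  induction N with
  | zero =>
    intro L L0 i hB
    rw [pvBelow_iff] at hB
    have := List.length_pos_of_mem hB.1
    omega
  | succ N ih =>
    intro L hlen i hB f rest ret
    rw [pvBelow_iff] at hB
    obtain ⟨hiL, hch⟩ := hB
    have hE : (L.erase i).length ≤ N := by
      have := List.length_pos_of_mem hiL
      rw [List.length_erase_of_mem hiL]; omega
    have HR : ∀ j, pvBelow g (L.erase i) j → ∀ f rest ret,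
        pvMach g (pvCost g (L.erase i) j + f) ((j, 0, 0, 1) :: rest) ret
          = pvMach g f rest (pvDp g (L.erase i) j) :=
      fun j hj => ih (L.erase i) hE j hj
    rw [pvCost_mem g L i hiL]
    match hcs : pvG g i with
    | [] =>
      simp only [List.map_nil, List.sum_nil, List.length_nil]
      have hfuel : 0 + 0 + 1 + f = f + 1 := by omega
      rw [hfuel, pvMach]
      have hGg : g.getD i [] = pvG g i := rfl
      rw [hGg, hcs]
      rw [if_neg (by simp : ¬ (0 : Nat) < ([] : List Nat).length)]
      rw [if_pos (by simp : ([] : List Nat).length = 0)]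
      rw [pvDp_mem g L i hiL, if_pos hcs]
    | j0 :: cs' =>
      simp only [List.map_cons, List.sum_cons, List.length_cons]
      have hfuel : (pvCost g (L.erase i) j0 + (cs'.map (fun j => pvCost g (L.erase i) j)).sum
          + (cs'.length + 1) + 1 + f)
          = (pvCost g (L.erase i) j0
              + ((cs'.map (fun j => pvCost g (L.erase i) j)).sum + cs'.length + 1 + f)) + 1 := by
        omega
      rw [hfuel, pvMach]
      have hGg : g.getD i [] = pvG g i := rfl
      rw [hGg, hcs]
      rw [if_pos (by simp : (0 : Nat) < (j0 :: cs').length)]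
      simp only [if_neg (by omega : ¬ (0:Nat) < 0)]
      rw [(by simp [List.getD] : (j0 :: cs').getD 0 0 = j0)]
      rw [HR j0 (hch j0 (by rw [hcs]; exact List.mem_cons_self)) _ _ _]
      have hframes := pvFrames g L i HR cs' 1 (0, 1) (pvDp g (L.erase i) j0) f rest
        (by rw [hcs, List.length_cons]; omega) (by rw [hcs]; rfl) (by omega)
        (fun x hx => hch x (by rw [hcs]; exact List.mem_cons_of_mem _ hx))
      rw [hframes]
      rw [pvDp_mem g L i hiL, if_neg (by rw [hcs]; simp)]
      rw [hcs]
      simp only [List.map_cons, List.foldl_cons, List.foldl_map]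

-- crude but sufficient fuel bound for the machine
theorem pvCost_le (g : List (List Nat)) (K : Nat) (hK : ∀ i, (pvG g i).length ≤ K) :
    ∀ (N : Nat) (L : List Nat) (i : Nat), L.length ≤ N →
    pvCost g L i + 1 ≤ (K + 2) ^ L.length := by
  intro N
  induction N with
  | zero =>
    intro L i hlen
    have hL : L = [] := List.eq_nil_of_length_eq_zero (by omega)
    subst hL
    rw [pvCost]; simp
  | succ N ih =>
    intro L i hlen
    by_cases hiL : i ∈ L
    · have hpos := List.length_pos_of_mem hiL
      rw [pvCost_mem g L i hiL]
      set m := L.length with hm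
      have hEl : (L.erase i).length = m - 1 := List.length_erase_of_mem hiL
      set P := (K + 2) ^ (m - 1) with hP
      have hP1 : 1 ≤ P := Nat.one_le_pow _ _ (by omega)
      have hsum : ((pvG g i).map (fun j => pvCost g (L.erase i) j)).sum
          ≤ (pvG g i).length * (P - 1) := by
        have hb : ∀ x ∈ (pvG g i).map (fun j => pvCost g (L.erase i) j), x ≤ P - 1 := by
          intro x hx
          obtain ⟨j, _, rfl⟩ := List.mem_map.1 hx
          have := ih (L.erase i) j (by omega)
          rw [hEl] at this
          omega
        calc ((pvG g i).map (fun j => pvCost g (L.erase i) j)).sum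
            ≤ ((pvG g i).map (fun j => pvCost g (L.erase i) j)).length * (P - 1) := by
              have := List.sum_le_card_nsmul _ (P - 1) hb
              simpa [smul_eq_mul, Nat.mul_comm] using this
          _ = (pvG g i).length * (P - 1) := by rw [List.length_map]
      have hlenK := hK i
      have hpow : (K + 2) ^ m = (K + 2) * P := by
        rw [hP, ← pow_succ']
        congr 1
        omega
      have hmul : (pvG g i).length * (P - 1) ≤ K * (P - 1) :=
        Nat.mul_le_mul_right _ hlenK
      have hKP : K * (P - 1) + K = K * P := by
        have : K * (P - 1) + K * 1 = K * (P - 1 + 1) := (Nat.mul_add K (P-1) 1).symm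
        simp at this
        rw [this]
        congr 1
        omega
      rw [hpow]
      have h2P : 2 ≤ 2 * P := by omega
      calc ((pvG g i).map (fun j => pvCost g (L.erase i) j)).sum + (pvG g i).length + 1 + 1
          ≤ K * (P - 1) + K + 2 := by omega
        _ = K * P + 2 := by omega
        _ ≤ K * P + 2 * P := by omega
        _ = (K + 2) * P := by ring
    · rw [pvCost]
      simp [hiL]
      exact Nat.one_le_pow _ _ (by omega)

-- ===== VERDICT (by name: the statement is the Claim_ definition above) =====
theorem solve_spec : Claim_equal_solve := by
  intro n a _hdom hpre
  unfold Spec_solve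
  have hn : 1 ≤ n := hpre.1
  set g := pvBuildA n a with hgdef
  have hg := pvGF_buildA n a hpre
  rw [← hgdef] at hg
  set S := pvScanA g n.toNat 0 [0] with hSdef
  obtain ⟨hnd, hb, heq, hpw, hns⟩ := pvScanA_trav n g hg hn
  rw [← hSdef] at hnd hb heq hpw hns
  have hcl : ∀ x ∈ S, ∀ y ∈ pvG g x, y ∈ S := by
    intro x hx y hy
    rw [heq]
    exact List.mem_cons_of_mem _ (List.mem_flatMap.2 ⟨x, hx, hy⟩)
  have h0S : 0 ∈ S := by rw [heq]; exact List.mem_cons_self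
  -- A's side
  have hA : solve n a = (pvDp g S 0).2 := by
    have := pvAfold g S hnd hpw hns hcl S [] (by simp) 0
    rw [if_pos h0S] at this
    simp only [solve, ← hgdef, ← hSdef, pvPopA_foldl]
    rw [this]
  -- B's side
  have hB0 : pvBelow g S 0 := by
    obtain ⟨tl, htl⟩ : ∃ tl, S = 0 :: tl := ⟨_, heq⟩
    exact pvBelow_suffix g S hnd hpw hns hcl S.length [] 0 tl (by rw [htl]) htl S
      (fun x hx => by rw [htl]; exact hx)
  have hK : ∀ i, (pvG g i).length ≤ n.toNat := by
    intro i
    exact pvLen_le _ _ (hg.2.2.2 i) (fun x hx => (hg.2.1 i x hx).2)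
  have hSlen : S.length ≤ n.toNat := pvLen_le S n.toNat hnd hb
  have hcost : pvCost g S 0 + 1 ≤ (n.toNat + 2) ^ (n.toNat + 2) := by
    have h1 := pvCost_le g n.toNat hK S.length S 0 (le_refl _)
    have h2 : (n.toNat + 2) ^ S.length ≤ (n.toNat + 2) ^ (n.toNat + 2) :=
      Nat.pow_le_pow_right (by omega) (by omega)
    omega
  have hB : solve_alt n a = (pvDp g S 0).2 := by
    have hfuel : (n.toNat + 2) ^ (n.toNat + 2)
        = pvCost g S 0 + ((n.toNat + 2) ^ (n.toNat + 2) - pvCost g S 0) := by omega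
    simp only [solve_alt, pvBuildB_eq n a hpre, ← hgdef]
    rw [hfuel, pvRun g S.length S (le_refl _) 0 hB0, pvMach_nil]
  rw [hA, hB]
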